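-- pv_equiv track=rewrite | github.com/4a50/SD-Model-Utils | SampleandModelCycler/SD-images-Script.py | prepareModelName
-- ===== SOURCE A (Python) =====
-- def prepareModelName(model):
--     modelSplit = model.split('.')
--     splitIdx = len(modelSplit) - 1
--     modelSplit.pop(splitIdx)
--     finalString = ''
--     for s in modelSplit:
--         finalString += f'{s}-'
--     return finalString
-- ===== SOURCE B (Python) =====
-- def prepareModelName(model):
--     # single backwards pass: emit nothing until the last '.' is seen,
--     # then copy characters with '.' turned into '-'; no split list
--     out = []
--     found = False
--     for c in reversed(model):
--         if found:
--             out.append('-' if c == '.' else c)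
--         elif c == '.':
--             found = True
--             out.append('-')
--     out.reverse()
--     return ''.join(out)
-- ===== Notes on version B (the rewrite author's own statement) =====
-- stated objective: alternative
-- what changed: Replaced the split-into-list / pop-last / concatenating loop by a single backwards character scan that emits nothing after the last dot and maps dots to dashes before it, with no intermediate list of parts.
import Mathlib
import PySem

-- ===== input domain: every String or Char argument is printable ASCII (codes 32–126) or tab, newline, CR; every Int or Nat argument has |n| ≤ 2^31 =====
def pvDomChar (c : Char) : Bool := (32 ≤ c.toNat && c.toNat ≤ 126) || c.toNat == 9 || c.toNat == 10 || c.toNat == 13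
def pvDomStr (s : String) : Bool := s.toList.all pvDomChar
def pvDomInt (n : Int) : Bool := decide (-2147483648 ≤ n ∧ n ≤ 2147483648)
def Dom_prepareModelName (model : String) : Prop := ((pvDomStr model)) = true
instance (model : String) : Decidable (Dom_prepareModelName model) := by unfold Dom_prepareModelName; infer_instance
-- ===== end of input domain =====

-- B replaces A's split-into-list / pop / concatenating loop by a single backwards
-- character pass (dots become dashes up to the last dot, nothing kept after it); objective: alternative.


-- ===== PORT A =====
def prepareModelName (model : String) : String :=
  let modelSplit := PySem.Chars.splitOn model.toList ['.']
  let splitIdx : Int := (modelSplit.length : Int) - 1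
  match PySem.List.pop? modelSplit splitIdx with
  | none => ""   -- unreachable: split('.') always returns a nonempty list
  | some (_, modelSplit') =>
      String.ofList (modelSplit'.foldl (fun acc s => acc ++ s ++ ['-']) [])

-- ===== PORT B =====
def prepareModelName_alt (model : String) : String :=
  let step := fun (st : List Char × Bool) (c : Char) =>
    if st.2 then (st.1 ++ [if c = '.' then '-' else c], st.2)
    else if c = '.' then (st.1 ++ ['-'], true)
    else st
  let st := model.toList.reverse.foldl step ([], false)
  String.ofList st.1.reverse

-- ===== PRECONDITION & SPEC =====
def Spec_prepareModelName (model : String) (out : String) : Prop := out = prepareModelName_alt model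
instance (model : String) (out : String) : Decidable (Spec_prepareModelName model out) := by unfold Spec_prepareModelName; infer_instance

-- ===== CLAIM (what is proved, stated in full; the proofs are below) =====
def Claim_equal_prepareModelName : Prop := ∀ (model : String), Dom_prepareModelName model → Spec_prepareModelName model (prepareModelName model)

-- ===== LEMMAS AND PROOFS =====

-- translate one kept character
def pvTr (c : Char) : Char := if c = '.' then '-' else c

-- split on '.' written as plain structural recursion (proof-side model of Chars.splitOn)
def pvSplitD : List Char → List (List Char)
  | [] => [[]]
  | c :: r => if c = '.' then [] :: pvSplitD r
              else (c :: (pvSplitD r).headI) :: (pvSplitD r).tail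

-- the common closed form both programs compute
def pvHH : List Char → List Char
  | [] => []
  | c :: r => if c = '.' ∨ '.' ∈ r then pvTr c :: pvHH r else []

-- proof-side model of B's scan before `found` becomes true
def pvEmit : List Char → List Char
  | [] => []
  | c :: t => if c = '.' then '-' :: t.map pvTr else pvEmit t

theorem pvSplitD_ne_nil (cs : List Char) : pvSplitD cs ≠ [] := by
  cases cs with
  | nil => simp [pvSplitD]
  | cons c r => by_cases h : c = '.' <;> simp [pvSplitD, h]

theorem pvSplitD_cons_eq (cs : List Char) :
    (pvSplitD cs).headI :: (pvSplitD cs).tail = pvSplitD cs := by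
  cases h : pvSplitD cs with
  | nil => exact absurd h (pvSplitD_ne_nil cs)
  | cons p ps => simp

theorem pv_go_spec (fuel : Nat) :
    ∀ (l cur : List Char) (accs : List (List Char)), l.length < fuel →
    PySem.Chars.splitOn.go ['.'] fuel l cur accs =
      accs.reverse ++ (cur.reverse ++ (pvSplitD l).headI) :: (pvSplitD l).tail := by
  induction fuel with
  | zero => intro l cur accs h; omega
  | succ n ih =>
      intro l cur accs h
      cases l with
      | nil => simp [PySem.Chars.splitOn.go, pvSplitD]
      | cons c rest =>
          by_cases hc : c = '.'
          · subst hc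
            have : (['.'] : List Char).isPrefixOf ('.' :: rest) = true := by
              simp [List.isPrefixOf]
            rw [PySem.Chars.splitOn.go]
            simp only [this, if_pos]
            simp only [List.length_cons, List.length_nil, List.drop_succ_cons, List.drop_zero]
            rw [ih rest [] (cur.reverse :: accs) (by simpa using Nat.lt_of_succ_lt_succ h)]
            simp [pvSplitD, pvSplitD_cons_eq]
          · have hpre : (['.'] : List Char).isPrefixOf (c :: rest) = false := by
              simp [List.isPrefixOf]
              intro hcontra; exact hc hcontra.symm
            rw [PySem.Chars.splitOn.go]
            simp only [hpre]
            rw [if_neg (by simp)]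
            rw [ih rest (c :: cur) accs (by simpa using Nat.lt_of_succ_lt_succ h)]
            simp [pvSplitD, hc]

theorem pvSplitOn_eq (cs : List Char) :
    PySem.Chars.splitOn cs ['.'] = pvSplitD cs := by
  unfold PySem.Chars.splitOn
  rw [pv_go_spec (cs.length + 1) cs [] [] (Nat.lt_succ_self _)]
  simpa using pvSplitD_cons_eq cs

theorem pvSplitD_tail_nil (cs : List Char) :
    (pvSplitD cs).tail = [] ↔ '.' ∉ cs := by
  induction cs with
  | nil => simp [pvSplitD]
  | cons c r ih =>
      by_cases hc : c = '.'
      · subst hc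
        simp [pvSplitD, pvSplitD_ne_nil r]
      · simp [pvSplitD, hc, ih, eq_comm]

theorem pvHH_nil_of_no_dot (cs : List Char) (h : '.' ∉ cs) : pvHH cs = [] := by
  cases cs with
  | nil => rfl
  | cons c r =>
      simp only [List.mem_cons, not_or] at h
      have hcond : ¬ (c = '.' ∨ '.' ∈ r) := by
        rintro (hc | hm)
        · exact h.1 hc.symm
        · exact h.2 hm
      rw [pvHH, if_neg hcond]

-- folding `acc ++ p ++ ['-']` is flattening the dash-suffixed parts
theorem pv_foldl_dash (parts : List (List Char)) :
    ∀ acc : List Char,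
    parts.foldl (fun acc p => acc ++ p ++ ['-']) acc
      = acc ++ (parts.map (· ++ ['-'])).flatten := by
  intro acc
  rw [show (fun (acc p : List Char) => acc ++ p ++ ['-'])
        = (fun (acc p : List Char) => acc ++ (p ++ ['-'])) from by
      funext a b; rw [List.append_assoc]]
  rw [PySem.List.foldl_append_eq_flatMap, List.flatMap_def]

-- A's value on the char level equals the closed form
theorem pvA_core (cs : List Char) :
    ((pvSplitD cs).dropLast.map (· ++ ['-'])).flatten = pvHH cs := by
  induction cs with
  | nil => simp [pvSplitD, pvHH]
  | cons c r ih =>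
      by_cases hc : c = '.'
      · subst hc
        have hs : pvSplitD ('.' :: r) = [] :: pvSplitD r := by simp [pvSplitD]
        rw [hs, List.dropLast_cons_of_ne_nil (pvSplitD_ne_nil r)]
        rw [List.map_cons, List.flatten_cons, ih, pvHH]
        simp [pvTr]
      · rw [pvSplitD]
        simp only [if_neg hc]
        rcases h : (pvSplitD r).tail with _ | ⟨q, qs⟩
        · -- no dot in r, single part: loop body never runs
          have hnd : '.' ∉ r := (pvSplitD_tail_nil r).mp h
          have : pvHH (c :: r) = [] := pvHH_nil_of_no_dot _ (by
            simp only [List.mem_cons, not_or]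
            exact ⟨fun h' => hc h'.symm, hnd⟩)
          simp [this]
        · have htl : (pvSplitD r).tail ≠ [] := by simp [h]
          rw [List.dropLast_cons_of_ne_nil (List.cons_ne_nil q qs)]
          have hdot : '.' ∈ r := by
            by_contra hnd
            exact htl ((pvSplitD_tail_nil r).mpr hnd)
          have hr : ((pvSplitD r).dropLast.map (· ++ ['-'])).flatten = pvHH r := ih
          rw [← pvSplitD_cons_eq r, List.dropLast_cons_of_ne_nil (by simp [h])] at hr
          simp only [List.map_cons, List.flatten_cons] at hr ⊢
          rw [List.cons_append, List.cons_append]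
          rw [pvHH]
          simp only [hdot, or_true, if_pos]
          rw [pvTr, if_neg hc, ← hr]
          simp [h]

-- scanning one more (earlier) character on the right end of B's pass
theorem pvEmit_append (xs : List Char) (c : Char) :
    pvEmit (xs ++ [c]) =
      if '.' ∈ xs then pvEmit xs ++ [pvTr c]
      else if c = '.' then ['-'] else [] := by
  induction xs with
  | nil => simp [pvEmit]
  | cons x t ih =>
      by_cases hx : x = '.'
      · subst hx; simp [pvEmit, pvTr]
      · simp [pvEmit, hx, ih, eq_comm]

-- B's foldl in terms of pvEmit / map
theorem pv_foldl_step (r : List Char) :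
    ∀ (out : List Char) (found : Bool),
    (r.foldl (fun (st : List Char × Bool) (c : Char) =>
        if st.2 then (st.1 ++ [if c = '.' then '-' else c], st.2)
        else if c = '.' then (st.1 ++ ['-'], true)
        else st) (out, found)).1
      = out ++ (if found then r.map pvTr else pvEmit r) := by
  induction r with
  | nil => intro out found; cases found <;> simp [pvEmit]
  | cons c t ih =>
      intro out found
      cases found with
      | true => simp [List.foldl_cons, ih, pvTr]
      | false =>
          by_cases hc : c = '.'
          · subst hc; simp [List.foldl_cons, ih, pvEmit]
          · simp [List.foldl_cons, hc, ih, pvEmit]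

-- B's value on the char level equals the closed form
theorem pvB_core (cs : List Char) : (pvEmit cs.reverse).reverse = pvHH cs := by
  induction cs with
  | nil => simp [pvEmit, pvHH]
  | cons c r ih =>
      rw [List.reverse_cons, pvEmit_append]
      by_cases hd : '.' ∈ r
      · simp only [List.mem_reverse, hd, if_pos]
        rw [pvHH]
        simp [hd, ih]
      · simp only [List.mem_reverse, hd]
        have hr : pvHH r = [] := pvHH_nil_of_no_dot r hd
        by_cases hc : c = '.'
        · subst hc; simp [pvHH, hr, pvTr]
        · simp [pvHH, hc, hd]

-- ===== VERDICT (by name: the statement is the Claim_ definition above) =====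
theorem prepareModelName_spec : Claim_equal_prepareModelName := by
  intro model _
  unfold Spec_prepareModelName prepareModelName prepareModelName_alt
  dsimp only
  rw [pvSplitOn_eq]
  have hne := pvSplitD_ne_nil model.toList
  have hlen : 0 < (pvSplitD model.toList).length := List.length_pos_of_ne_nil hne
  have hpop : PySem.List.pop? (pvSplitD model.toList)
      (((pvSplitD model.toList).length : Int) - 1)
      = some ((pvSplitD model.toList).getLast hne, (pvSplitD model.toList).dropLast) := by
    unfold PySem.List.pop? PySem.List.pyIdx?
    rw [if_pos (by omega : (0 : Int) ≤ ((pvSplitD model.toList).length : Int) - 1),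
        if_pos (by omega : ((pvSplitD model.toList).length : Int) - 1 < ((pvSplitD model.toList).length : Int))]
    have htn : (((pvSplitD model.toList).length : Int) - 1).toNat
        = (pvSplitD model.toList).length - 1 := by omega
    rw [htn]
    simp [List.eraseIdx_length_sub_one,
      List.getElem?_eq_getElem (by omega : (pvSplitD model.toList).length - 1 < (pvSplitD model.toList).length),
      Option.bind, List.getLast_eq_getElem]
  rw [hpop]
  dsimp only
  rw [pv_foldl_dash, pv_foldl_step]
  simp only [List.nil_append, Bool.false_eq_true, if_false]
  rw [pvA_core, pvB_core]
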